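-- pv_equiv track=rewrite | github.com/princemanjee/EngineeredPromptLibrrary | write_skills.py | process_content
-- ===== SOURCE A (Python) =====
-- def process_content(content):
--     lines = content.split('\n')
--     result = []
--     in_comment = False
--     heading_skipped = False
--     for line in lines:
--         if not in_comment and '<!--' in line:
--             in_comment = True
--             if '-->' in line:
--                 in_comment = False
--             continue
--         if in_comment:
--             if '-->' in line:
--                 in_comment = False
--             continue
--         if not heading_skipped and line.startswith('# '):
--             heading_skipped = True
--             continue
--         result.append(line)
--     return '\n'.join(result)
-- ===== SOURCE B (Python) =====
-- def process_content(content):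
--     # Pass 1: drop HTML-comment lines (any line containing '<!--' and all lines up to one containing '-->').
--     kept = []
--     in_comment = False
--     for line in content.split('\n'):
--         if in_comment or '<!--' in line:
--             in_comment = '-->' not in line
--         else:
--             kept.append(line)
--     # Pass 2: remove the first remaining line that starts with '# '.
--     for i, line in enumerate(kept):
--         if line.startswith('# '):
--             del kept[i]
--             break
--     return '\n'.join(kept)
-- ===== Notes on version B (the rewrite author's own statement) =====
-- stated objective: simpler
-- what changed: Replaced A's single loop with two interleaved flags (in_comment, heading_skipped) by two sequential passes: first strip HTML-comment lines, then delete the first remaining heading line from the stripped list.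
import Mathlib
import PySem

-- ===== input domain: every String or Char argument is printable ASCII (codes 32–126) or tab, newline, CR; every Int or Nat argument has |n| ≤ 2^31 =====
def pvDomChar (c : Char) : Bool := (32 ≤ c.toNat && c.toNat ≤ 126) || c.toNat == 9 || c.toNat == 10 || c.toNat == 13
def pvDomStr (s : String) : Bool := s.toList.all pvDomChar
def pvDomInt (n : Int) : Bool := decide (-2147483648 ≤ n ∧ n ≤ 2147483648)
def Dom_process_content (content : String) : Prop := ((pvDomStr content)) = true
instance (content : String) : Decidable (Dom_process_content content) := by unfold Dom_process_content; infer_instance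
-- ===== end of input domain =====

-- B replaces A's single loop with two interleaved flags by two sequential passes
-- (strip comment lines, then delete the first heading line); objective: simpler.

-- ===== PORT A =====
-- A's single loop over the lines with state (in_comment, heading_skipped, result-so-far).
def pcLoopA : List (List Char) → Bool → Bool → List (List Char)
  | [], _, _ => []
  | l :: ls, ic, hs =>
    if !ic && PySem.Chars.isIn "<!--".toList l then
      pcLoopA ls (if PySem.Chars.isIn "-->".toList l then false else true) hs
    else if ic then
      pcLoopA ls (if PySem.Chars.isIn "-->".toList l then false else ic) hs
    else if !hs && PySem.Chars.startswith l "# ".toList then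
      pcLoopA ls ic true
    else
      l :: pcLoopA ls ic hs

def process_content (content : String) : String :=
  String.ofList (PySem.Chars.join "\n".toList (pcLoopA (PySem.Chars.splitOn content.toList "\n".toList) false false))

-- ===== PORT B =====
-- Pass 1: drop comment lines, carrying only the in_comment flag.
def pcStrip : List (List Char) → Bool → List (List Char)
  | [], _ => []
  | l :: ls, ic =>
    if ic || PySem.Chars.isIn "<!--".toList l then
      pcStrip ls (!PySem.Chars.isIn "-->".toList l)
    else
      l :: pcStrip ls ic

-- Pass 2: delete the first heading line (Source B's del-and-break scan).
def pcDropHeading : List (List Char) → List (List Char)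
  | [] => []
  | l :: ls => if PySem.Chars.startswith l "# ".toList then ls else l :: pcDropHeading ls

def process_content_alt (content : String) : String :=
  String.ofList (PySem.Chars.join "\n".toList (pcDropHeading (pcStrip (PySem.Chars.splitOn content.toList "\n".toList) false)))

-- ===== PRECONDITION & SPEC =====
def Spec_process_content (content : String) (out : String) : Prop := out = process_content_alt content
instance (content : String) (out : String) : Decidable (Spec_process_content content out) := by unfold Spec_process_content; infer_instance

-- ===== CLAIM (what is proved, stated in full; the proofs are below) =====
def Claim_equal_process_content : Prop := ∀ (content : String), Dom_process_content content → Spec_process_content content (process_content content)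

-- ===== LEMMAS AND PROOFS =====

-- After the heading is skipped, A's loop coincides with B's strip pass.
theorem pcLoopA_true : ∀ (ls : List (List Char)) (ic : Bool),
    pcLoopA ls ic true = pcStrip ls ic := by
  intro ls
  induction ls with
  | nil => intro ic; rfl
  | cons l ls ih =>
    intro ic
    cases ic with
    | false =>
      by_cases hc : PySem.Chars.isIn ['<', '!', '-', '-'] l = true
      · simp [pcLoopA, pcStrip, hc, ih]
      · simp [pcLoopA, pcStrip, hc, ih]
    | true =>
      simp [pcLoopA, pcStrip, ih]

-- With heading not yet skipped, A's fused loop is B's two passes composed.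
theorem pcLoopA_eq_false : ∀ (ls : List (List Char)) (ic : Bool),
    pcLoopA ls ic false = pcDropHeading (pcStrip ls ic) := by
  intro ls
  induction ls with
  | nil => intro ic; rfl
  | cons l ls ih =>
    intro ic
    by_cases hc : (ic || PySem.Chars.isIn "<!--".toList l) = true
    · cases ic with
      | false =>
        simp at hc
        simp [pcLoopA, pcStrip, hc, ih]
      | true =>
        simp [pcLoopA, pcStrip, ih]
    · simp at hc
      obtain ⟨hic, hno⟩ := hc
      subst hic
      by_cases hh : PySem.Chars.startswith l ['#', ' '] = true
      · simp [pcLoopA, pcStrip, hno, hh, pcDropHeading, pcLoopA_true]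
      · simp [pcLoopA, pcStrip, hno, hh, pcDropHeading, ih]

-- ===== VERDICT (by name: the statement is the Claim_ definition above) =====
theorem process_content_spec : Claim_equal_process_content := by
  intro content _
  unfold Spec_process_content process_content process_content_alt
  rw [pcLoopA_eq_false]
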